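-- pv_equiv track=rewrite | github.com/Zandrenel/Comp_479_crawler_queryProcessor | static/queryProcessor.py | sortPostingsOR
-- ===== SOURCE A (Python) =====
-- def pairSortBubble(postings, indice):
--     #willApply Bubble sort due to the posting lists are likely
--     #to already be in order by docID and that is the primary indice
--     #I currently need to sort it by, so it will likely have best
--     #time of n instead of n^2
--     newPost = postings
--     for i in range(len(postings)):
--         for k in range(0,len(postings)-i-1):
--             if newPost[k][indice] < newPost[k+1][indice]:
--                 temp = newPost[k+1]
--                 newPost[k+1] = newPost[k]
--                 newPost[k] = temp
--
--     return newPost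
--
-- def sortPostingsOR(queryPostings, postingList):
--     finalPostings = []
--     finalPostings2 = []
--     queryPostings2 = []
--     for i in range(len(queryPostings)):
--         queryPostings2.append([])
--         for k in range(len(queryPostings[i])):
--             queryPostings2[i].append(queryPostings[i][k][0])
--     #Will create pairs of postings and how many terms appear in the posting
--     for i in postingList:
--         count = 0
--         for k in range(len(queryPostings2)):
--             if i in queryPostings2[k]:
--                 count +=1
--         finalPostings.append((i, count))
--
--     #will sort the postings by the indice indicating how many search terms are
--     #in it
--     finalPostings = pairSortBubble(finalPostings,1)
--
--     #since the search returns in ascending order, will put it in descending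
--     #order so that it is mostTermsPresent -> leastTermsPresent
--     for i in range(len(finalPostings)):
--         finalPostings2.insert(0,finalPostings[i][0])
--     return finalPostings2
-- ===== SOURCE B (Python) =====
-- def sortPostingsOR(queryPostings, postingList):
--     # Inverted accumulation: count once per query term into a dict, then one stable sort.
--     counts = {}
--     for term in queryPostings:
--         for d in dict.fromkeys(p[0] for p in term):
--             counts[d] = counts.get(d, 0) + 1
--     return sorted(reversed(postingList), key=lambda d: counts.get(d, 0))
-- ===== Notes on version B (the rewrite author's own statement) =====
-- stated objective: faster
-- what changed: Replaces A's per-doc-per-term membership scanning plus an O(n^2) bubble sort with a single inverted accumulation into a count dictionary followed by one stable library sort of the reversed posting list.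
import Mathlib
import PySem

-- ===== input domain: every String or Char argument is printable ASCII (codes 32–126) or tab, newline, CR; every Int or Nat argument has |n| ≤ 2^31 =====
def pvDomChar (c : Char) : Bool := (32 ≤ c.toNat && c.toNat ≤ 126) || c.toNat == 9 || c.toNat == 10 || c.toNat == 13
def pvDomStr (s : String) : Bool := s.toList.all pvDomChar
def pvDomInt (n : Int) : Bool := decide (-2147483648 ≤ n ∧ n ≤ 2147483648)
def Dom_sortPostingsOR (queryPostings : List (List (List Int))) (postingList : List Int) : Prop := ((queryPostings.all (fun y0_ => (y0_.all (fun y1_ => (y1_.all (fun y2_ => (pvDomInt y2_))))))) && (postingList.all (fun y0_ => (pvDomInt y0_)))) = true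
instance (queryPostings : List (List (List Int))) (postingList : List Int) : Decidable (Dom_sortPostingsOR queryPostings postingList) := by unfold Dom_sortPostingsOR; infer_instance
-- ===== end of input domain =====

-- B replaces A's per-doc membership counting and bubble sort by one inverted counting pass
-- into a dict plus a single stable sort of the reversed posting list (objective: faster).

-- ===== PORT A =====
-- tuple indexing postings[k][indice] with a runtime index, on pairs: component select
def pvSel (p : Int × Int) (indice : Int) : Int := if indice = 0 then p.1 else p.2

def pairSortBubble (postings : List (Int × Int)) (indice : Int) : List (Int × Int) :=
  (PySem.List.pyRange 0 (PySem.List.len postings) 1).foldl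
    (fun newPost i =>
      (PySem.List.pyRange 0 (PySem.List.len postings - i - 1) 1).foldl
        (fun np k =>
          if pvSel (PySem.List.pyGetD np k (0, 0)) indice <
              pvSel (PySem.List.pyGetD np (k + 1) (0, 0)) indice then
            PySem.List.pySetD (PySem.List.pySetD np (k + 1) (PySem.List.pyGetD np k (0, 0)))
              k (PySem.List.pyGetD np (k + 1) (0, 0))
          else np)
        newPost)
    postings

def sortPostingsOR (queryPostings : List (List (List Int))) (postingList : List Int) : List Int :=
  let queryPostings2 : List (List Int) :=
    (PySem.List.pyRange 0 (PySem.List.len queryPostings) 1).foldl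
      (fun q2 i =>
        q2 ++ [(PySem.List.pyRange 0 (PySem.List.len (PySem.List.pyGetD queryPostings i [])) 1).foldl
          (fun row k =>
            row ++ [PySem.List.pyGetD (PySem.List.pyGetD (PySem.List.pyGetD queryPostings i []) k []) 0 0])
          []])
      []
  let finalPostings : List (Int × Int) :=
    postingList.foldl
      (fun fp i =>
        let count : Int :=
          (PySem.List.pyRange 0 (PySem.List.len queryPostings2) 1).foldl
            (fun c k => if i ∈ PySem.List.pyGetD queryPostings2 k [] then c + 1 else c) 0
        fp ++ [(i, count)])
      []
  let finalPostingsS := pairSortBubble finalPostings 1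
  (PySem.List.pyRange 0 (PySem.List.len finalPostingsS) 1).foldl
    (fun f2 i => PySem.List.insert f2 0 (PySem.List.pyGetD finalPostingsS i (0, 0)).1) []

-- ===== PORT B =====
def sortPostingsOR_alt (queryPostings : List (List (List Int))) (postingList : List Int) : List Int :=
  let counts : PySem.Dict Int Int :=
    queryPostings.foldl
      (fun counts term =>
        (PySem.List.dedup (term.map (fun p => PySem.List.pyGetD p 0 0))).foldl
          (fun counts d => counts.insert d (counts.getD d 0 + 1)) counts)
      PySem.Dict.empty
  PySem.List.sorted postingList.reverse (fun d => counts.getD d 0) false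

-- ===== PRECONDITION & SPEC =====
-- Pre_ excludes inputs with an empty innermost posting entry: there Python A raises
-- IndexError on queryPostings[i][k][0] (and Python B raises the same way).
def Pre_sortPostingsOR (queryPostings : List (List (List Int))) (postingList : List Int) : Prop :=
  ∀ term ∈ queryPostings, ∀ p ∈ term, p ≠ []
instance (queryPostings : List (List (List Int))) (postingList : List Int) : Decidable (Pre_sortPostingsOR queryPostings postingList) := by unfold Pre_sortPostingsOR; infer_instance

def pvWitness_sortPostingsOR : List (List (List Int)) × List Int :=
  ([[[1], [2]], [[2, 5]]], [1, 2, 3])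

def Spec_sortPostingsOR (queryPostings : List (List (List Int))) (postingList : List Int) (out : List Int) : Prop := out = sortPostingsOR_alt queryPostings postingList
instance (queryPostings : List (List (List Int))) (postingList : List Int) (out : List Int) : Decidable (Spec_sortPostingsOR queryPostings postingList out) := by unfold Spec_sortPostingsOR; infer_instance

-- ===== CLAIM (what is proved, stated in full; the proofs are below) =====
def Claim_equal_sortPostingsOR : Prop := ∀ (queryPostings : List (List (List Int))) (postingList : List Int), Dom_sortPostingsOR queryPostings postingList → Pre_sortPostingsOR queryPostings postingList → Spec_sortPostingsOR queryPostings postingList (sortPostingsOR queryPostings postingList)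

-- ===== LEMMAS AND PROOFS =====

-- structural form of A's bubble pass / bubble loop (proof-side only)
def bpass : List (Int × Int) → List (Int × Int)
  | [] => []
  | [x] => [x]
  | x :: y :: t => if x.2 < y.2 then y :: bpass (x :: t) else x :: bpass (y :: t)

def bloop : Nat → List (Int × Int) → List (Int × Int)
  | 0, l => l
  | m + 1, l => bloop m (bpass (l.take (m + 1)) ++ l.drop (m + 1))

def pvStep (np : List (Int × Int)) (k : Int) : List (Int × Int) :=
  if (PySem.List.pyGetD np k (0, 0)).2 < (PySem.List.pyGetD np (k + 1) (0, 0)).2 then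
    PySem.List.pySetD (PySem.List.pySetD np (k + 1) (PySem.List.pyGetD np k (0, 0)))
      k (PySem.List.pyGetD np (k + 1) (0, 0))
  else np

def pvKey (queryPostings : List (List (List Int))) (d : Int) : Int :=
  (queryPostings.countP
    (fun term => decide (d ∈ term.map (fun p => PySem.List.pyGetD p 0 0))) : Int)

lemma pyGetD_append_length {α : Type} (u : List α) (x : α) (r : List α) (d : α) (i : Int)
    (hi : i = u.length) :
    PySem.List.pyGetD (u ++ x :: r) i d = x := by
  subst hi; simp [PySem.List.pyGetD_natCast, List.getD_eq_getElem?_getD]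

lemma pySetD_append_length {α : Type} (u : List α) (x : α) (r : List α) (v : α) (i : Int)
    (hi : i = u.length) :
    PySem.List.pySetD (u ++ x :: r) i v = u ++ v :: r := by
  subst hi; simp [PySem.List.pySetD, PySem.List.pySet?, PySem.List.pyIdx?]

lemma bpass_perm (xs : List (Int × Int)) : (bpass xs).Perm xs := by
  induction xs using bpass.induct with
  | case1 => simp [bpass]
  | case2 x => simp [bpass]
  | case3 x y t h ih =>
      simp only [bpass, if_pos h]
      exact (ih.cons y).trans (List.Perm.swap x y t)
  | case4 x y t h ih =>
      simp only [bpass, if_neg h]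
      exact ih.cons x

lemma filter_bpass (xs : List (Int × Int)) (c : Int) :
    (bpass xs).filter (fun p => p.2 == c) = xs.filter (fun p => p.2 == c) := by
  induction xs using bpass.induct with
  | case1 => simp [bpass]
  | case2 x => simp [bpass]
  | case3 x y t h ih =>
      simp only [bpass, if_pos h, List.filter_cons] at *
      by_cases hx : x.2 = c <;> by_cases hy : y.2 = c <;> simp_all
  | case4 x y t h ih =>
      simp only [bpass, if_neg h, List.filter_cons] at *
      by_cases hx : x.2 = c <;> simp_all

lemma bpass_last (x : Int × Int) (xs : List (Int × Int)) :
    ∃ ys a, bpass (x :: xs) = ys ++ [a] ∧ ∀ z ∈ x :: xs, a.2 ≤ z.2 := by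
  induction xs generalizing x with
  | nil => exact ⟨[], x, by simp [bpass], by simp⟩
  | cons y t ih =>
    by_cases h : x.2 < y.2
    · obtain ⟨ys, a, he, hm⟩ := ih x
      refine ⟨y :: ys, a, by simp [bpass, h, he], ?_⟩
      intro z hz
      have hax : a.2 ≤ x.2 := hm x (by simp)
      rcases List.mem_cons.1 hz with rfl | hz
      · exact hax
      · rcases List.mem_cons.1 hz with rfl | hz
        · exact le_of_lt (lt_of_le_of_lt hax h)
        · exact hm z (by simp [hz])
    · obtain ⟨ys, a, he, hm⟩ := ih y
      refine ⟨x :: ys, a, by simp [bpass, h, he], ?_⟩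
      intro z hz
      rcases List.mem_cons.1 hz with rfl | hz
      · exact le_trans (hm y (by simp)) (by omega)
      · exact hm z hz

lemma length_bpass (xs : List (Int × Int)) : (bpass xs).length = xs.length := by
  induction xs using bpass.induct with
  | case1 => simp [bpass]
  | case2 x => simp [bpass]
  | case3 x y t h ih => simp [bpass, h] at *; omega
  | case4 x y t h ih => simp [bpass, h] at *; omega

lemma pass_eq : ∀ (xs u v : List (Int × Int)),
    (PySem.List.pyRange (u.length : Int) ((u.length : Int) + (xs.length : Int) - 1) 1).foldl
      pvStep (u ++ (xs ++ v)) = u ++ (bpass xs ++ v) := by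
  intro xs
  induction xs using bpass.induct with
  | case1 =>
      intro u v
      rw [PySem.List.pyRange_one_eq_nil (by simp only [List.length_nil]; push_cast; omega)]
      simp [bpass]
  | case2 x =>
      intro u v
      rw [PySem.List.pyRange_one_eq_nil
        (by simp only [List.length_cons, List.length_nil]; push_cast; omega)]
      simp [bpass]
  | case3 x y t h ih =>
      intro u v
      rw [PySem.List.pyRange_one_cons
        (by simp only [List.length_cons]; push_cast; omega), List.foldl_cons]
      have hl2 : u ++ ((x :: y :: t) ++ v) = (u ++ [x]) ++ y :: (t ++ v) := by simp
      have hgx : PySem.List.pyGetD (u ++ ((x :: y :: t) ++ v)) (u.length : Int) (0,0) = x :=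
        pyGetD_append_length u x (y :: t ++ v) (0,0) _ rfl
      have hgy : PySem.List.pyGetD (u ++ ((x :: y :: t) ++ v)) ((u.length : Int) + 1) (0,0) = y := by
        rw [hl2]; exact pyGetD_append_length (u ++ [x]) y (t ++ v) (0,0) _ (by simp)
      have hstep : pvStep (u ++ ((x :: y :: t) ++ v)) (u.length : Int)
          = (u ++ [y]) ++ ((x :: t) ++ v) := by
        rw [pvStep, hgx, hgy, if_pos h, hl2,
          pySetD_append_length (u ++ [x]) y (t ++ v) x _ (by simp)]
        have he : (u ++ [x]) ++ x :: (t ++ v) = u ++ x :: (x :: (t ++ v)) := by simp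
        rw [he, pySetD_append_length u x (x :: (t ++ v)) y _ rfl]
        simp
      rw [hstep]
      have := ih (u ++ [y]) v
      have harg : ((u ++ [y]).length : Int) = (u.length : Int) + 1 := by simp
      rw [harg] at this
      have hub : ((u.length : Int) + 1) + ((x :: t).length : Int) - 1
          = (u.length : Int) + ((x :: y :: t).length : Int) - 1 := by
        simp only [List.length_cons]; push_cast; omega
      rw [hub] at this
      rw [this]
      simp [bpass, h]
  | case4 x y t h ih =>
      intro u v
      rw [PySem.List.pyRange_one_cons
        (by simp only [List.length_cons]; push_cast; omega), List.foldl_cons]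
      have hl2 : u ++ ((x :: y :: t) ++ v) = (u ++ [x]) ++ y :: (t ++ v) := by simp
      have hgx : PySem.List.pyGetD (u ++ ((x :: y :: t) ++ v)) (u.length : Int) (0,0) = x :=
        pyGetD_append_length u x (y :: t ++ v) (0,0) _ rfl
      have hgy : PySem.List.pyGetD (u ++ ((x :: y :: t) ++ v)) ((u.length : Int) + 1) (0,0) = y := by
        rw [hl2]; exact pyGetD_append_length (u ++ [x]) y (t ++ v) (0,0) _ (by simp)
      have hstep : pvStep (u ++ ((x :: y :: t) ++ v)) (u.length : Int)
          = (u ++ [x]) ++ ((y :: t) ++ v) := by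
        rw [pvStep, hgx, hgy, if_neg h]
        simp
      rw [hstep]
      have := ih (u ++ [x]) v
      have harg : ((u ++ [x]).length : Int) = (u.length : Int) + 1 := by simp
      rw [harg] at this
      have hub : ((u.length : Int) + 1) + ((y :: t).length : Int) - 1
          = (u.length : Int) + ((x :: y :: t).length : Int) - 1 := by
        simp only [List.length_cons]; push_cast; omega
      rw [hub] at this
      rw [this]
      simp [bpass, h]

lemma outer_eq (n : Nat) : ∀ (m : Nat) (l : List (Int × Int)), l.length = n → m ≤ n →
    (PySem.List.pyRange ((n - m : Nat) : Int) (n : Int) 1).foldl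
      (fun np i => (PySem.List.pyRange 0 ((n : Int) - i - 1) 1).foldl pvStep np) l
    = bloop m l := by
  intro m
  induction m with
  | zero =>
      intro l hl _
      rw [Nat.sub_zero, PySem.List.pyRange_one_eq_nil (le_refl _)]
      simp [bloop]
  | succ m ih =>
      intro l hl hm
      rw [PySem.List.pyRange_one_cons (by omega), List.foldl_cons]
      have htl : (l.take (m + 1)).length = m + 1 := by
        simp [List.length_take]; omega
      have hinner : (PySem.List.pyRange 0 ((n : Int) - ((n - (m+1) : Nat) : Int) - 1) 1).foldl
          pvStep l = bpass (l.take (m + 1)) ++ l.drop (m + 1) := by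
        have hb : (n : Int) - ((n - (m+1) : Nat) : Int) - 1 = (m : Int) := by omega
        rw [hb]
        have := pass_eq (l.take (m+1)) [] (l.drop (m+1))
        simp only [List.length_nil, Nat.cast_zero, List.nil_append, htl] at this
        rw [List.take_append_drop] at this
        have hb2 : (0 : Int) + ((m+1 : Nat) : Int) - 1 = (m : Int) := by omega
        rw [hb2] at this
        exact this
      rw [hinner]
      have hlow : ((n - (m+1) : Nat) : Int) + 1 = ((n - m : Nat) : Int) := by omega
      rw [hlow]
      have hlen : (bpass (l.take (m + 1)) ++ l.drop (m + 1)).length = n := by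
        simp [length_bpass, htl, List.length_drop]; omega
      rw [ih _ hlen (by omega)]
      simp [bloop]

lemma pairSortBubble_eq (l : List (Int × Int)) :
    pairSortBubble l 1 = bloop l.length l := by
  unfold pairSortBubble
  simp only [pvSel, PySem.List.len_eq]
  norm_num
  have := outer_eq l.length l.length l rfl (le_refl _)
  rw [Nat.sub_self] at this
  simpa [pvStep] using this

lemma bloop_perm : ∀ (m : Nat) (l : List (Int × Int)), (bloop m l).Perm l := by
  intro m
  induction m with
  | zero => intro l; simp [bloop]
  | succ m ih =>
      intro l
      have h1 : (bloop (m+1) l) = bloop m (bpass (l.take (m + 1)) ++ l.drop (m + 1)) := by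
        simp [bloop]
      rw [h1]
      refine (ih _).trans ?_
      have h2 := (bpass_perm (l.take (m+1))).append_right (l.drop (m+1))
      rwa [List.take_append_drop] at h2

lemma filter_bloop : ∀ (m : Nat) (l : List (Int × Int)) (c : Int),
    (bloop m l).filter (fun p => p.2 == c) = l.filter (fun p => p.2 == c) := by
  intro m
  induction m with
  | zero => intro l c; simp [bloop]
  | succ m ih =>
      intro l c
      have h1 : (bloop (m+1) l) = bloop m (bpass (l.take (m + 1)) ++ l.drop (m + 1)) := by
        simp [bloop]
      rw [h1, ih, List.filter_append, filter_bpass, ← List.filter_append,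
        List.take_append_drop]

lemma bloop_sorted : ∀ (m : Nat) (l : List (Int × Int)), m ≤ l.length →
    (l.drop m).Pairwise (fun a b => b.2 ≤ a.2) →
    (∀ x ∈ l.take m, ∀ y ∈ l.drop m, y.2 ≤ x.2) →
    (bloop m l).Pairwise (fun a b => b.2 ≤ a.2) := by
  intro m
  induction m with
  | zero =>
      intro l _ h _
      simpa [bloop] using h
  | succ m ih =>
      intro l hm hdrop hbound
      have h1 : (bloop (m+1) l) = bloop m (bpass (l.take (m + 1)) ++ l.drop (m + 1)) := by
        simp [bloop]
      rw [h1]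
      have htl : (l.take (m + 1)).length = m + 1 := by simp [List.length_take]; omega
      obtain ⟨x, xs, hT⟩ : ∃ x xs, l.take (m+1) = x :: xs := by
        cases hE : l.take (m+1) with
        | nil => rw [hE] at htl; simp at htl
        | cons x xs => exact ⟨x, xs, rfl⟩
      obtain ⟨ys, a, he, hmin⟩ := bpass_last x xs
      rw [hT, he]
      have hperm : (ys ++ [a]).Perm (l.take (m+1)) := by
        rw [hT, ← he]; exact bpass_perm _
      have hysmem : ∀ z ∈ ys, z ∈ l.take (m+1) := fun z hz => hperm.mem_iff.1 (by simp [hz])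
      have hamem : a ∈ l.take (m+1) := hperm.mem_iff.1 (by simp)
      have hysl : ys.length = m := by
        have := hperm.length_eq
        simp [htl] at this; omega
      set l' := ys ++ [a] ++ l.drop (m+1) with hl'
      have htake' : l'.take m = ys := by
        rw [hl', List.append_assoc, List.take_append_of_le_length (by omega)]
        exact List.take_of_length_le (by omega)
      have hdrop' : l'.drop m = a :: l.drop (m+1) := by
        rw [hl', List.append_assoc, List.drop_append_of_le_length (by omega)]
        simp [hysl]
      have hmin' : ∀ z ∈ l.take (m+1), a.2 ≤ z.2 := by
        rw [hT]; exact hmin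
      apply ih
      · have : l'.length = l.length := by
          rw [hl']
          simp [hysl, List.length_drop]; omega
        omega
      · rw [hdrop']
        apply List.Pairwise.cons
        · intro y hy
          exact hbound a hamem y (by simpa using hy)
        · simpa using hdrop
      · intro z hz y hy
        rw [htake'] at hz
        rw [hdrop'] at hy
        rcases List.mem_cons.1 hy with rfl | hy
        · exact hmin' z (hysmem z hz)
        · exact hbound z (hysmem z hz) y (by simpa using hy)

lemma stable_desc_unique : ∀ (ys zs : List (Int × Int)), ys.Perm zs →
    ys.Pairwise (fun a b => b.2 ≤ a.2) → zs.Pairwise (fun a b => b.2 ≤ a.2) →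
    (∀ c : Int, ys.filter (fun p => p.2 == c) = zs.filter (fun p => p.2 == c)) →
    ys = zs := by
  intro ys
  induction ys with
  | nil => intro zs hp _ _ _; exact (hp.nil_eq).symm ▸ rfl
  | cons a ys ih =>
      intro zs hp hy hz hf
      cases zs with
      | nil => exact absurd hp (by simp)
      | cons b zs =>
          have hya := List.pairwise_cons.1 hy
          have hzb := List.pairwise_cons.1 hz
          have hab : a.2 = b.2 := by
            have ha : a ∈ b :: zs := hp.mem_iff.1 (by simp)
            have hb : b ∈ a :: ys := hp.symm.mem_iff.1 (by simp)
            rcases List.mem_cons.1 ha with rfl | ha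
            · rfl
            · rcases List.mem_cons.1 hb with rfl | hb
              · rfl
              · exact le_antisymm (hzb.1 a ha) (hya.1 b hb)
          have hfc := hf a.2
          simp only [List.filter_cons, beq_self_eq_true, if_pos] at hfc
          rw [hab] at hfc
          simp only [beq_self_eq_true, if_pos] at hfc
          obtain ⟨hab2, htail⟩ := List.cons_eq_cons.1 hfc
          subst hab2
          congr 1
          refine ih _ hp.cons_inv hya.2 hzb.2 ?_
          intro c
          by_cases hc : a.2 = c
          · rw [← hc]; exact htail
          · have hx := hf c
            simpa [List.filter_cons, hc] using hx

lemma filter_insertBy {α : Type} (key : α → Int) (x : α) (ys : List α) (c : Int)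
    (h : ys.Pairwise (fun a b => key a ≤ key b)) :
    (PySem.List.insertBy (fun a b => decide (key a < key b)) x ys).filter (fun a => key a == c)
      = if key x == c then ys.filter (fun a => key a == c) ++ [x]
        else ys.filter (fun a => key a == c) := by
  induction ys with
  | nil => simp [PySem.List.insertBy, List.filter_cons]
  | cons y ys ih =>
      have hy := List.pairwise_cons.1 h
      rw [PySem.List.insertBy]
      by_cases hb : key x < key y
      · rw [if_pos (by simpa using hb)]
        by_cases hxc : key x = c
        · have hyc : ¬ (key y = c) := by omega
          have hync : ∀ z ∈ ys, ¬ (key z = c) := by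
            intro z hz
            have := hy.1 z hz
            omega
          simp only [List.filter_cons, hxc]
          simp only [beq_self_eq_true, if_pos]
          have h1 : (ys.filter (fun a => key a == c)) = [] := by
            apply List.filter_eq_nil_iff.2
            intro z hz
            simpa using hync z hz
          simp [h1, hyc]
        · simp [List.filter_cons, hxc]
      · rw [if_neg (by simpa using hb)]
        simp only [List.filter_cons]
        rw [ih hy.2]
        by_cases hxc : key x = c <;> by_cases hyc : key y = c <;> simp [hxc, hyc]

lemma filter_sorted {α : Type} (xs : List α) (key : α → Int) (c : Int) :
    (PySem.List.sorted xs key false).filter (fun a => key a == c)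
      = xs.filter (fun a => key a == c) := by
  induction xs using List.reverseRecOn with
  | nil => rfl
  | append_singleton xs x ih =>
      rw [PySem.List.sorted_eq_foldl_insertBy, List.foldl_append, List.foldl_cons, List.foldl_nil,
        ← PySem.List.sorted_eq_foldl_insertBy]
      rw [filter_insertBy key x _ c (PySem.List.sorted_pairwise xs key)]
      by_cases hxc : key x = c <;> simp [hxc, ih, List.filter_append]

lemma insertBy_map {α β : Type} (key : β → Int) (f : α → β) (x : α) (ys : List α) :
    PySem.List.insertBy (fun a b => decide (key a < key b)) (f x) (ys.map f)
      = (PySem.List.insertBy (fun a b => decide (key (f a) < key (f b))) x ys).map f := by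
  induction ys with
  | nil => simp [PySem.List.insertBy]
  | cons y ys ih =>
      rw [List.map_cons, PySem.List.insertBy, PySem.List.insertBy]
      by_cases hb : key (f x) < key (f y)
      · rw [if_pos (by simpa using hb), if_pos (by simpa using hb)]
        simp
      · rw [if_neg (by simpa using hb), if_neg (by simpa using hb)]
        simp [ih]

lemma sorted_map {α β : Type} (xs : List α) (f : α → β) (key : β → Int) :
    PySem.List.sorted (xs.map f) key false
      = (PySem.List.sorted xs (fun a => key (f a)) false).map f := by
  rw [PySem.List.sorted_eq_foldl_insertBy, PySem.List.sorted_eq_foldl_insertBy]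
  suffices h : ∀ (acc : List α), (xs.map f).foldl
      (fun acc x => PySem.List.insertBy (fun a b => decide (key a < key b)) x acc) (acc.map f)
      = (xs.foldl (fun acc x => PySem.List.insertBy (fun a b => decide (key (f a) < key (f b))) x acc) acc).map f by
    simpa using h []
  induction xs with
  | nil => intro acc; rfl
  | cons x xs ih =>
      intro acc
      rw [List.map_cons, List.foldl_cons, List.foldl_cons, insertBy_map key f x acc]
      exact ih _

lemma foldl_cons_fst : ∀ (l : List (Int × Int)) (acc : List Int),
    l.foldl (fun acc p => p.1 :: acc) acc = (l.map (·.1)).reverse ++ acc := by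
  intro l
  induction l with
  | nil => intro acc; simp
  | cons x l ih => intro acc; simp [ih]

lemma count_dedup (xs : List Int) (v : Int) :
    (PySem.List.dedup xs).count v = if v ∈ xs then 1 else 0 := by
  by_cases h : v ∈ xs
  · rw [if_pos h]
    exact List.count_eq_one_of_mem (by simp)
      (by simpa using (PySem.List.mem_dedup xs v).2 h)
  · rw [if_neg h]
    exact List.count_eq_zero.2 (fun hm => h ((PySem.List.mem_dedup xs v).1 hm))

lemma getD_counts (queryPostings : List (List (List Int))) :
    ∀ (c : PySem.Dict Int Int) (v : Int),
    (queryPostings.foldl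
      (fun counts term =>
        (PySem.List.dedup (term.map (fun p => PySem.List.pyGetD p 0 0))).foldl
          (fun counts d => counts.insert d (counts.getD d 0 + 1)) counts)
      c).getD v 0 = c.getD v 0 + pvKey queryPostings v := by
  induction queryPostings with
  | nil => intro c v; simp [pvKey]
  | cons t rest ih =>
      intro c v
      rw [List.foldl_cons, ih]
      rw [PySem.Dict.getD_foldl_insert_add_one, count_dedup]
      unfold pvKey
      rw [List.countP_cons]
      by_cases h : v ∈ t.map (fun p => PySem.List.pyGetD p 0 0) <;> simp [h] <;> ring

lemma altEq (queryPostings : List (List (List Int))) (postingList : List Int) :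
    sortPostingsOR_alt queryPostings postingList
      = PySem.List.sorted postingList.reverse (pvKey queryPostings) false := by
  simp only [sortPostingsOR_alt]
  have hk : (fun d => (queryPostings.foldl
      (fun counts term =>
        (PySem.List.dedup (term.map (fun p => PySem.List.pyGetD p 0 0))).foldl
          (fun counts d => counts.insert d (counts.getD d 0 + 1)) counts)
      PySem.Dict.empty).getD d 0) = pvKey queryPostings := by
    funext d
    rw [getD_counts]
    simp
  rw [hk]

lemma bubble_eq_sorted (l : List (Int × Int)) :
    bloop l.length l = (PySem.List.sorted l.reverse (fun p => p.2) false).reverse := by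
  apply stable_desc_unique
  · refine (bloop_perm _ _).trans ?_
    have h1 : ((PySem.List.sorted l.reverse (fun p : Int × Int => p.2) false).reverse).Perm l :=
      (List.reverse_perm _).trans ((PySem.List.sorted_perm l.reverse (fun p => p.2) false).trans (List.reverse_perm _))
    exact h1.symm
  · exact bloop_sorted _ _ (le_refl _) (by simp) (by simp)
  · exact List.pairwise_reverse.2 (by
      simpa using PySem.List.sorted_pairwise l.reverse (fun p : Int × Int => p.2))
  · intro c
    rw [filter_bloop, List.filter_reverse, filter_sorted l.reverse (fun p : Int × Int => p.2) c,
      List.filter_reverse, List.reverse_reverse]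

lemma aEq (queryPostings : List (List (List Int))) (postingList : List Int) :
    sortPostingsOR queryPostings postingList
      = PySem.List.sorted postingList.reverse (pvKey queryPostings) false := by
  simp only [sortPostingsOR]
  -- queryPostings2 = queryPostings.map (fun t => t.map hd)
  rw [PySem.List.foldl_pyRange_zero_pyGetD queryPostings []
    (fun q2 t => q2 ++ [(PySem.List.pyRange 0 (PySem.List.len t) 1).foldl
      (fun row k => row ++ [PySem.List.pyGetD (PySem.List.pyGetD t k []) 0 0]) []]) []]
  rw [PySem.List.foldl_append_singleton_eq_map
    (fun t => (PySem.List.pyRange 0 (PySem.List.len t) 1).foldl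
      (fun row k => row ++ [PySem.List.pyGetD (PySem.List.pyGetD t k []) 0 0]) []) queryPostings []]
  have hrow : ∀ t : List (List Int),
      (PySem.List.pyRange 0 (PySem.List.len t) 1).foldl
        (fun row k => row ++ [PySem.List.pyGetD (PySem.List.pyGetD t k []) 0 0]) []
      = t.map (fun p => PySem.List.pyGetD p 0 0) := by
    intro t
    rw [PySem.List.foldl_pyRange_zero_pyGetD t []
      (fun row p => row ++ [PySem.List.pyGetD p 0 0]) []]
    simpa using PySem.List.foldl_append_singleton_eq_map (fun p => PySem.List.pyGetD p 0 0) t []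
  simp only [hrow, List.nil_append]
  -- count loop = pvKey
  have hcount : ∀ i : Int,
      (PySem.List.pyRange 0 (PySem.List.len (queryPostings.map (fun t => t.map (fun p => PySem.List.pyGetD p 0 0)))) 1).foldl
        (fun c k => if i ∈ PySem.List.pyGetD (queryPostings.map (fun t => t.map (fun p => PySem.List.pyGetD p 0 0))) k [] then c + 1 else c) 0
      = pvKey queryPostings i := by
    intro i
    rw [PySem.List.foldl_pyRange_zero_pyGetD
      (queryPostings.map (fun t => t.map (fun p => PySem.List.pyGetD p 0 0))) []
      (fun c t => if i ∈ t then c + 1 else c) 0]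
    rw [PySem.List.foldl_ite_add_one (fun t => i ∈ t)]
    rw [List.countP_map]
    unfold pvKey
    simp only [zero_add, Function.comp_def]
  simp only [hcount]
  rw [PySem.List.foldl_append_singleton_eq_map (fun i => (i, pvKey queryPostings i)) postingList []]
  rw [List.nil_append]
  set pairs := postingList.map (fun i => (i, pvKey queryPostings i)) with hpairs
  rw [pairSortBubble_eq, bubble_eq_sorted]
  set S := (PySem.List.sorted pairs.reverse (fun p : Int × Int => p.2) false).reverse with hS
  simp only [PySem.List.insert_zero]
  rw [PySem.List.foldl_pyRange_zero_pyGetD S (0, 0) (fun f2 p => p.1 :: f2) []]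
  rw [foldl_cons_fst, List.append_nil, hS, List.map_reverse, List.reverse_reverse]
  have hrev : pairs.reverse = postingList.reverse.map (fun i => (i, pvKey queryPostings i)) := by
    rw [hpairs, List.map_reverse]
  rw [hrev, sorted_map postingList.reverse (fun i => (i, pvKey queryPostings i)) (fun p => p.2)]
  rw [List.map_map]
  simp [Function.comp_def]

-- ===== VERDICT (by name: the statement is the Claim_ definition above) =====
theorem sortPostingsOR_spec : Claim_equal_sortPostingsOR := by
  intro qp pl _ _
  unfold Spec_sortPostingsOR
  rw [aEq, altEq]
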